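-- pv_equiv track=rewrite | github.com/antonalth/cs2-transformer-agent | transformers/model3/visualize_inference.py | decode_keyboard
-- ===== SOURCE A (Python) =====
-- KEYBOARD_ONLY_ACTIONS = [
--     "IN_ATTACK", "IN_JUMP", "IN_DUCK", "IN_FORWARD", "IN_BACK", "IN_USE", "IN_CANCEL", "IN_TURNLEFT",
--     "IN_TURNRIGHT", "IN_MOVELEFT", "IN_MOVERIGHT", "IN_ATTACK2", "IN_RELOAD", "IN_ALT1", "IN_ALT2",
--     "IN_SPEED", "IN_WALK", "IN_ZOOM", "IN_WEAPON1", "IN_WEAPON2", "IN_BULLRUSH", "IN_GRENADE1",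
--     "IN_GRENADE2", "IN_ATTACK3", "IN_SCORE", "IN_INSPECT", "SWITCH_1", "SWITCH_2", "SWITCH_3", "SWITCH_4", "SWITCH_5"]
--
-- def decode_keyboard(mask: int) -> str:
--     """Decodes uint32 keyboard mask into a short string."""
--     active = []
--     # Common movement keys for concise display
--     move_map = {
--         "IN_FORWARD": "W", "IN_BACK": "S", "IN_MOVELEFT": "A", "IN_MOVERIGHT": "D",
--         "IN_JUMP": "JUMP", "IN_DUCK": "DUCK", "IN_WALK": "WALK", "IN_ATTACK": "ATK1",
--         "IN_ATTACK2": "ATK2", "IN_RELOAD": "R", "IN_USE": "E", "IN_SCORE": "TAB"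
--     }
--
--     for i, action in enumerate(KEYBOARD_ONLY_ACTIONS):
--         if (mask >> i) & 1:
--             active.append(move_map.get(action, action.replace("IN_", "")))
--     return " ".join(active)
-- ===== SOURCE B (Python) =====
-- # Same decoding, but: the per-action display names are precomputed once into
-- # LABELS, and the loop walks only the SET bits of the mask (clearing the lowest
-- # set bit each round) instead of scanning all 31 positions with a dict lookup.
--
-- LABELS = [
--     "ATK1", "JUMP", "DUCK", "W", "S", "E", "CANCEL", "TURNLEFT",
--     "TURNRIGHT", "A", "D", "ATK2", "R", "ALT1", "ALT2",
--     "SPEED", "WALK", "ZOOM", "WEAPON1", "WEAPON2", "BULLRUSH", "GRENADE1",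
--     "GRENADE2", "ATTACK3", "TAB", "INSPECT", "SWITCH_1", "SWITCH_2",
--     "SWITCH_3", "SWITCH_4", "SWITCH_5"]
--
--
-- def decode_keyboard(mask: int) -> str:
--     """Decodes uint32 keyboard mask into a short string."""
--     m = mask % (1 << 31)          # only bits 0..30 matter; non-negative
--     parts = []
--     while m:
--         rest = m & (m - 1)        # m with its lowest set bit cleared
--         parts.append(LABELS[(m ^ rest).bit_length() - 1])
--         m = rest
--     return " ".join(parts)
-- ===== Notes on version B (the rewrite author's own statement) =====
-- stated objective: alternative
-- what changed: B precomputes the 31 display names into a LABELS table once and then walks only the set bits of the mask (clearing the lowest set bit with m & (m-1) and locating it with bit_length), instead of A's scan over all 31 actions with a dict lookup and string replace per hit.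
import Mathlib
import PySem

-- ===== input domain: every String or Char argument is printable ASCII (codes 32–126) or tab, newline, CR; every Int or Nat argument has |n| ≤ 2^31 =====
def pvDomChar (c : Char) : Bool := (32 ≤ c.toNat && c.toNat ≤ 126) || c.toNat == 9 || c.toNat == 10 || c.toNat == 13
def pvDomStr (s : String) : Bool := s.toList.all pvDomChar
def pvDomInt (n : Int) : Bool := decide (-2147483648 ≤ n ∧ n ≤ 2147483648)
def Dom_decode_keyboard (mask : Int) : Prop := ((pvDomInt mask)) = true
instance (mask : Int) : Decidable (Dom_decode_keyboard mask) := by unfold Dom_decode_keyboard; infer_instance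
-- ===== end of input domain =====

-- B precomputes the 31 display names into a table and walks only the set bits of
-- the mask (clearing the lowest set bit each round) instead of scanning all 31
-- positions with a dict lookup; objective: alternative (same cost class).


-- ===== PORT A =====
def pvActions : List String :=
  ["IN_ATTACK", "IN_JUMP", "IN_DUCK", "IN_FORWARD", "IN_BACK", "IN_USE", "IN_CANCEL", "IN_TURNLEFT",
   "IN_TURNRIGHT", "IN_MOVELEFT", "IN_MOVERIGHT", "IN_ATTACK2", "IN_RELOAD", "IN_ALT1", "IN_ALT2",
   "IN_SPEED", "IN_WALK", "IN_ZOOM", "IN_WEAPON1", "IN_WEAPON2", "IN_BULLRUSH", "IN_GRENADE1",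
   "IN_GRENADE2", "IN_ATTACK3", "IN_SCORE", "IN_INSPECT", "SWITCH_1", "SWITCH_2", "SWITCH_3", "SWITCH_4", "SWITCH_5"]

def pvMoveMap : PySem.Dict String String :=
  PySem.Dict.ofList
    [("IN_FORWARD", "W"), ("IN_BACK", "S"), ("IN_MOVELEFT", "A"), ("IN_MOVERIGHT", "D"),
     ("IN_JUMP", "JUMP"), ("IN_DUCK", "DUCK"), ("IN_WALK", "WALK"), ("IN_ATTACK", "ATK1"),
     ("IN_ATTACK2", "ATK2"), ("IN_RELOAD", "R"), ("IN_USE", "E"), ("IN_SCORE", "TAB")]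

-- A's loop: for i, action in enumerate(...): if (mask >> i) & 1: active.append(...).
-- enumerate indices are 0..30, so '.toNat' on them is exact for Python's 'mask >> i'.
def decode_keyboard (mask : Int) : String :=
  let active :=
    (PySem.List.enumerate pvActions).foldl
      (fun acc p =>
        if PySem.Int.band (mask >>> p.1.toNat) 1 ≠ 0 then
          acc ++ [PySem.Dict.getD pvMoveMap p.2 (PySem.Str.replace p.2 "IN_" "")]
        else acc)
      []
  PySem.Str.join " " active

-- ===== PORT B =====
def pvLabels : List String :=
  ["ATK1", "JUMP", "DUCK", "W", "S", "E", "CANCEL", "TURNLEFT",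
   "TURNRIGHT", "A", "D", "ATK2", "R", "ALT1", "ALT2",
   "SPEED", "WALK", "ZOOM", "WEAPON1", "WEAPON2", "BULLRUSH", "GRENADE1",
   "GRENADE2", "ATTACK3", "TAB", "INSPECT", "SWITCH_1", "SWITCH_2",
   "SWITCH_3", "SWITCH_4", "SWITCH_5"]

-- Source B's while-loop; m stays non-negative (it starts as mask % 2**31), so it is a Nat here.
-- LABELS[...] is in range whenever this is reached from decode_keyboard_alt (index ≤ 30);
-- pyGetD's default is never used there.
def pvGo (m : Nat) : List String :=
  if h : m = 0 then []
  else
    let rest := m &&& (m - 1)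
    let idx : Nat := PySem.Int.bitLength ((m ^^^ rest : Nat) : Int) - 1
    PySem.List.pyGetD pvLabels (idx : Int) "" :: pvGo rest
termination_by m
decreasing_by
  exact Nat.lt_of_le_of_lt Nat.and_le_right (by omega)

def decode_keyboard_alt (mask : Int) : String :=
  PySem.Str.join " " (pvGo (PySem.Int.mod mask (1 <<< 31)).toNat)

-- ===== PRECONDITION & SPEC =====
def Spec_decode_keyboard (mask : Int) (out : String) : Prop := out = decode_keyboard_alt mask
instance (mask : Int) (out : String) : Decidable (Spec_decode_keyboard mask out) := by unfold Spec_decode_keyboard; infer_instance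

-- ===== CLAIM (what is proved, stated in full; the proofs are below) =====
def Claim_equal_decode_keyboard : Prop := ∀ (mask : Int), Dom_decode_keyboard mask → Spec_decode_keyboard mask (decode_keyboard mask)

-- ===== LEMMAS AND PROOFS =====

-- the label A computes for position i (proof-side helper)
def pvLabel (i : Nat) : String := pvLabels.getD i ""

-- the common midpoint: labels of the set bits of M among 0..30, in ascending order
def pvMidL (M : Nat) : List String :=
  (List.range' 0 31).filterMap (fun i => if M.testBit i then some (pvLabel i) else none)

-- clamped mask
def pvM (mask : Int) : Nat := (PySem.Int.mod mask (1 <<< 31)).toNat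

theorem pvMod_eq (mask : Int) : PySem.Int.mod mask (((1 <<< 31 : Nat) : Int)) = mask % (2 ^ 31) := by
  have h : (((1 <<< 31 : Nat) : Int)) = (2 ^ 31 : Int) := by
    simp [Nat.shiftLeft_eq]
  rw [h]
  simp [PySem.Int.mod, Int.fmod_eq_emod]

-- A's bit test agrees with testBit of the clamped mask on positions < 31
theorem pvCondBit (mask : Int) (i : Nat) (hi : i < 31) :
    (PySem.Int.band (mask >>> i) 1 ≠ 0) ↔ ((pvM mask).testBit i = true) := by
  rw [PySem.Int.band_one]
  have hmod2 : ∀ x : Int, PySem.Int.mod x 2 = x % 2 := by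
    intro x; simp [PySem.Int.mod, Int.fmod_eq_emod]
  rw [hmod2, Int.shiftRight_eq_div_pow]
  unfold pvM
  rw [pvMod_eq]
  set r : Int := mask % (2 ^ 31) with hr
  have hr0 : 0 ≤ r := Int.emod_nonneg mask (by norm_num)
  have hrlt : r < 2 ^ 31 := Int.emod_lt_of_pos mask (by norm_num)
  obtain ⟨n, hn⟩ : ∃ n : Nat, r = (n : Int) := ⟨r.toNat, (Int.toNat_of_nonneg hr0).symm⟩
  have hpow : ((2 ^ i : Nat) : Int) * ((2 ^ (31 - i) : Nat) : Int) = 2 ^ 31 := by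
    push_cast
    rw [← pow_add]
    have h31 : i + (31 - i) = 31 := by omega
    rw [h31]
    norm_num
  have hmask : mask = r + ((2 ^ i : Nat) : Int) * (((2 ^ (31 - i) : Nat) : Int) * (mask / 2 ^ 31)) := by
    rw [← mul_assoc, hpow]
    have h1 := Int.emod_add_mul_ediv mask (2 ^ 31)
    omega
  have hdiv : mask / ((2 ^ i : Nat) : Int) = r / (2 ^ i : Nat) + (2 ^ (31 - i) : Nat) * (mask / 2 ^ 31) := by
    conv_lhs => rw [hmask]
    rw [Int.add_mul_ediv_left _ _ (by positivity)]
  rw [hdiv]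
  have h2 : ((2 ^ (31 - i) : Nat) : Int) * (mask / 2 ^ 31) = 2 * ((2 ^ (30 - i) : Nat) * (mask / 2 ^ 31)) := by
    push_cast
    rw [← mul_assoc]
    congr 1
    rw [← pow_succ']
    congr 1
    omega
  rw [h2, Int.add_mul_emod_self_left]
  rw [Nat.testBit_eq_decide_div_mod_eq]
  rw [hn, Int.toNat_natCast, ← Int.natCast_div]
  simp only [decide_eq_true_eq]
  omega

def pvG (a : String) : String := PySem.Dict.getD pvMoveMap a (PySem.Str.replace a "IN_" "")

theorem pvGen (M : Nat) (l : List String) : ∀ (k : Nat),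
    ((PySem.List.enumerate l ↑k).filter (fun q => M.testBit q.1.toNat)).map (fun q => pvG q.2)
    = (List.range' k l.length).filterMap
        (fun i => if M.testBit i then some (pvG (l.getD (i - k) "")) else none) := by
  induction l with
  | nil => intro k; simp [PySem.List.enumerate_nil]
  | cons a tl ih =>
    intro k
    rw [PySem.List.enumerate_cons]
    have hk1 : (↑k + 1 : Int) = ↑(k + 1) := by push_cast; ring
    rw [hk1]
    simp only [List.filter_cons, List.length_cons, List.range'_succ]
    have htail : (List.range' (k + 1) tl.length).filterMap
        (fun i => if M.testBit i then some (pvG ((a :: tl).getD (i - k) "")) else none)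
      = (List.range' (k + 1) tl.length).filterMap
        (fun i => if M.testBit i then some (pvG (tl.getD (i - (k + 1)) "")) else none) := by
      apply List.filterMap_congr
      intro i hi
      rw [List.mem_range'_1] at hi
      have : i - k = (i - (k + 1)) + 1 := by omega
      rw [this]
      rfl
    rw [List.filterMap_cons, htail, ← ih (k + 1)]
    simp only [Int.toNat_natCast, Nat.sub_self]
    by_cases hbit : M.testBit k = true
    · simp [hbit]
    · simp [hbit]

-- A-side: the fold equals the midpoint
theorem pvActions_length : pvActions.length = 31 := by decide

theorem pvAside (mask : Int) :
    decode_keyboard mask = PySem.Str.join " " (pvMidL (pvM mask)) := by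
  simp only [decode_keyboard]
  have hf := PySem.List.foldl_append_if
    (p := fun q : Int × String => decide (PySem.Int.band (mask >>> ((q.1.toNat : Nat) : Int)) 1 ≠ 0))
    (f := fun q : Int × String => PySem.Dict.getD pvMoveMap q.2 (PySem.Str.replace q.2 "IN_" ""))
    (PySem.List.enumerate pvActions) []
  simp only [decide_eq_true_eq] at hf
  rw [hf, List.nil_append]
  have hcong : ∀ q ∈ PySem.List.enumerate pvActions 0,
      (decide (PySem.Int.band (mask >>> ((q.1.toNat : Nat) : Int)) 1 ≠ 0)) = (pvM mask).testBit q.1.toNat := by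
    intro q hq
    rw [PySem.List.mem_enumerate_iff] at hq
    obtain ⟨j, hj, rfl⟩ := hq
    rw [pvActions_length] at hj
    simp only [zero_add, Int.toNat_natCast]
    rw [Int.shiftRight_natCast_right]
    have hb := pvCondBit mask j hj
    by_cases h : (pvM mask).testBit j = true
    · simp [h, hb.mpr h]
    · simp only [Bool.not_eq_true] at h
      simp only [h, decide_eq_false_iff_not, Decidable.not_not]
      by_contra hne
      exact absurd (hb.mp hne) (by simp [h])
  rw [List.filter_congr hcong]
  have hgen := pvGen (pvM mask) pvActions 0
  rw [pvActions_length] at hgen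
  norm_num at hgen
  rw [show (fun q : Int × String => PySem.Dict.getD pvMoveMap q.2 (PySem.Str.replace q.2 "IN_" "")) = (fun q : Int × String => pvG q.2) from rfl]
  rw [hgen]
  congr 1

-- B-side: the set-bit walk equals the midpoint
theorem pvDecomp (M : Nat) (h : M ≠ 0) : ∃ t q, M = 2 ^ (t + 1) * q + 2 ^ t := by
  induction M using Nat.strong_induction_on with
  | _ M ih =>
    rcases Nat.even_or_odd M with he | ho
    · obtain ⟨m, hm⟩ := he
      have hm2 : M = 2 * m := by omega
      have hmne : m ≠ 0 := by omega
      obtain ⟨t, q, htq⟩ := ih m (by omega) hmne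
      exact ⟨t + 1, q, by rw [hm2, htq]; ring⟩
    · obtain ⟨m, hm⟩ := ho
      exact ⟨0, m, by omega⟩

theorem pvBitLenPow (t : Nat) : PySem.Int.bitLength ((2 ^ t : Nat) : Int) = t + 1 := by
  induction t with
  | zero => decide
  | succ t ih =>
    rw [PySem.Int.bitLength_natCast (by positivity)]
    have : 2 ^ (t + 1) / 2 = 2 ^ t := by
      rw [pow_succ]
      omega
    rw [this, ih]

theorem pvTbM (t q j : Nat) :
    (2 ^ (t + 1) * q + 2 ^ t).testBit j
      = (if j < t then false else if j = t then true else q.testBit (j - (t + 1))) := by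
  rw [Nat.testBit_two_pow_mul_add q (Nat.pow_lt_pow_right (by norm_num) (by omega)) j]
  rcases Nat.lt_trichotomy j t with h | h | h
  · have a1 : j < t + 1 := by omega
    have a2 : ¬ t = j := by omega
    simp [h, a1, a2, Nat.testBit_two_pow]
  · simp [h]
  · have a1 : ¬ j < t := by omega
    have a2 : ¬ j < t + 1 := by omega
    have a3 : ¬ j ≤ t := by omega
    have a4 : ¬ j = t := by omega
    have a5 : ¬ t = j := by omega
    simp [a1, a2, a3, a4, a5, Nat.testBit_two_pow]

theorem pvTbR (t q j : Nat) :
    (2 ^ (t + 1) * q).testBit j = (if j < t + 1 then false else q.testBit (j - (t + 1))) := by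
  have h0 : 2 ^ (t + 1) * q = 2 ^ (t + 1) * q + 0 := by omega
  rw [h0, Nat.testBit_two_pow_mul_add q (by positivity) j]
  simp [Nat.zero_testBit]

theorem pvRestEq (t q : Nat) :
    (2 ^ (t + 1) * q + 2 ^ t) &&& (2 ^ (t + 1) * q + 2 ^ t - 1) = 2 ^ (t + 1) * q := by
  have h1 : (1 : Nat) ≤ 2 ^ t := Nat.one_le_two_pow
  have hsub : 2 ^ (t + 1) * q + 2 ^ t - 1 = 2 ^ (t + 1) * q + (2 ^ t - 1) := by omega
  apply Nat.eq_of_testBit_eq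
  intro j
  rw [Nat.testBit_and, hsub, pvTbM,
    Nat.testBit_two_pow_mul_add q (by have := Nat.pow_lt_pow_right (a := 2) (by norm_num) (by omega : t < t + 1); omega) j,
    pvTbR, Nat.testBit_two_pow_sub_one]
  rcases Nat.lt_trichotomy j t with h | h | h
  · have a1 : j < t + 1 := by omega
    have a2 : j ≤ t := by omega
    simp [h, a1, a2]
  · have a1 : t < t + 1 := by omega
    have a2 : ¬ t < t := by omega
    simp [h, a1, a2]
  · have a1 : ¬ j < t := by omega
    have a2 : ¬ j ≤ t := by omega
    have a3 : ¬ j = t := by omega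
    have a4 : ¬ j < t + 1 := by omega
    simp [a1, a2, a3, a4]

theorem pvLsbEq (t q : Nat) :
    (2 ^ (t + 1) * q + 2 ^ t) ^^^ 2 ^ (t + 1) * q = 2 ^ t := by
  apply Nat.eq_of_testBit_eq
  intro j
  rw [Nat.testBit_xor, pvTbM, pvTbR, Nat.testBit_two_pow]
  rcases Nat.lt_trichotomy j t with h | h | h
  · have a1 : j < t + 1 := by omega
    have a2 : ¬ t = j := by omega
    simp [h, a1, a2]
  · have a1 : t < t + 1 := by omega
    simp [h, a1]
  · have a1 : ¬ j < t := by omega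
    have a2 : ¬ j ≤ t := by omega
    have a3 : ¬ j = t := by omega
    have a4 : ¬ j < t + 1 := by omega
    have a5 : ¬ t = j := by omega
    simp [a1, a2, a3, a4, a5]

theorem pvMid_nil : pvMidL 0 = [] := by
  simp [pvMidL, Nat.zero_testBit]

theorem pvT31 (t q : Nat) (h31 : 2 ^ (t + 1) * q + 2 ^ t < 2 ^ 31) : t < 31 := by
  have h2t : (2:Nat) ^ t < 2 ^ 31 := by omega
  exact (Nat.pow_lt_pow_iff_right (by norm_num)).mp h2t

theorem pvMid_cons (t q : Nat) (h31 : 2 ^ (t + 1) * q + 2 ^ t < 2 ^ 31) :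
    pvMidL (2 ^ (t + 1) * q + 2 ^ t) = pvLabel t :: pvMidL (2 ^ (t + 1) * q) := by
  have ht31 : t < 31 := pvT31 t q h31
  unfold pvMidL
  have hsplit : List.range' 0 31 = List.range' 0 t ++ List.range' t (31 - t) := by
    have h := List.range'_append (s := 0) (m := t) (n := 31 - t) (step := 1)
    simp only [Nat.zero_add, Nat.one_mul] at h
    rw [(by omega : t + (31 - t) = 31)] at h
    exact h.symm
  have hsplit2 : List.range' 0 31 = List.range' 0 (t + 1) ++ List.range' (t + 1) (30 - t) := by
    have h := List.range'_append (s := 0) (m := t + 1) (n := 30 - t) (step := 1)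
    simp only [Nat.zero_add, Nat.one_mul] at h
    rw [(by omega : (t + 1) + (30 - t) = 31)] at h
    exact h.symm
  have hrt : List.range' t (31 - t) = t :: List.range' (t + 1) (30 - t) := by
    rw [(by omega : 31 - t = (30 - t) + 1), List.range'_succ]
  have hnil1 : (List.range' 0 t).filterMap
      (fun i => if (2 ^ (t + 1) * q + 2 ^ t).testBit i then some (pvLabel i) else none) = [] := by
    apply List.filterMap_eq_nil_iff.mpr
    intro a ha
    rw [List.mem_range'_1] at ha
    rw [pvTbM]
    simp [(show a < t by omega)]
  have hhead : (if (2 ^ (t + 1) * q + 2 ^ t).testBit t then some (pvLabel t) else none)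
      = some (pvLabel t) := by
    rw [pvTbM]
    simp
  have htail : (List.range' (t + 1) (30 - t)).filterMap
      (fun i => if (2 ^ (t + 1) * q + 2 ^ t).testBit i then some (pvLabel i) else none)
    = (List.range' (t + 1) (30 - t)).filterMap
      (fun i => if (2 ^ (t + 1) * q).testBit i then some (pvLabel i) else none) := by
    apply List.filterMap_congr
    intro a ha
    rw [List.mem_range'_1] at ha
    have b1 : ¬ a < t := by omega
    have b2 : ¬ a = t := by omega
    have b3 : ¬ a < t + 1 := by omega
    rw [pvTbM, pvTbR]
    simp [b1, b2, b3]
  have hnil2 : (List.range' 0 (t + 1)).filterMap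
      (fun i => if (2 ^ (t + 1) * q).testBit i then some (pvLabel i) else none) = [] := by
    apply List.filterMap_eq_nil_iff.mpr
    intro a ha
    rw [List.mem_range'_1] at ha
    rw [pvTbR]
    simp [(show a < t + 1 by omega)]
  conv_lhs => rw [hsplit, hrt, List.filterMap_append, List.filterMap_cons]
  rw [hnil1, hhead, htail, List.nil_append]
  conv_rhs => rw [hsplit2, List.filterMap_append]
  rw [hnil2, List.nil_append]

theorem pvGetLab : ∀ t : Nat, t < 31 → PySem.List.pyGetD pvLabels ((t : Nat) : Int) "" = pvLabel t := by decide

theorem pvGo_zero : pvGo 0 = [] := by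
  rw [pvGo]
  simp

theorem pvGo_step (t q : Nat) (ht : t < 31) :
    pvGo (2 ^ (t + 1) * q + 2 ^ t) = pvLabel t :: pvGo (2 ^ (t + 1) * q) := by
  have h1 : (1 : Nat) ≤ 2 ^ t := Nat.one_le_two_pow
  have hne : 2 ^ (t + 1) * q + 2 ^ t ≠ 0 := by omega
  rw [pvGo, dif_neg hne]
  simp only [pvRestEq, pvLsbEq, pvBitLenPow, Nat.add_sub_cancel]
  rw [pvGetLab t ht]

theorem pvBside (M : Nat) (hM : M < 2 ^ 31) : pvGo M = pvMidL M := by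
  induction M using Nat.strong_induction_on with
  | _ M ih =>
    by_cases h0 : M = 0
    · subst h0
      rw [pvGo_zero, pvMid_nil]
    · obtain ⟨t, q, rfl⟩ := pvDecomp M h0
      have h2t : (1 : Nat) ≤ 2 ^ t := Nat.one_le_two_pow
      rw [pvGo_step t q (pvT31 t q hM), pvMid_cons t q hM,
        ih (2 ^ (t + 1) * q) (by omega) (by omega)]

-- ===== VERDICT (by name: the statement is the Claim_ definition above) =====
theorem decode_keyboard_spec : Claim_equal_decode_keyboard := by
  intro mask _
  unfold Spec_decode_keyboard
  rw [pvAside]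
  unfold decode_keyboard_alt
  have h : (PySem.Int.mod mask (1 <<< 31)).toNat = pvM mask := rfl
  have hb : pvM mask < 2 ^ 31 := by
    unfold pvM
    have h1 := PySem.Int.mod_nonneg mask (b := ((1 <<< 31 : Nat) : Int)) (by simp [Nat.shiftLeft_eq])
    have h2 := PySem.Int.mod_lt mask (b := ((1 <<< 31 : Nat) : Int)) (by simp [Nat.shiftLeft_eq])
    have h3 : (((1 <<< 31 : Nat) : Int)) = (2 ^ 31 : Int) := by simp [Nat.shiftLeft_eq]
    omega
  rw [h, pvBside _ hb]
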